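-- pv_equiv track=rewrite | github.com/ARM-software/arm-systemready | common/log_parser/standalone_tests/logs_to_json.py | extract_smbios_block
-- ===== SOURCE A (Python) =====
-- def extract_smbios_block(lines):
--     """
--     Extract the SmbiosTable test block from a full SCT Summary.log.
--
--     Strategy:
--       1. Find the first line that mentions "SmbiosTable".
--       2. Walk backwards to include the surrounding ACS/BBR header.
--       3. Walk forwards until the next "Arm ACS Version" (start of next test) or EOF.
--     """
--     n = len(lines)
--     smbios_idx = None
--
--     # 1) Find first "SmbiosTable" occurrence
--     for i, line in enumerate(lines):
--         if "SmbiosTable" in line: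
--             smbios_idx = i
--             break
--
--     if smbios_idx is None:
--         return []
--
--     # 2) Find block start (go back to the ACS header if present)
--     start = 0
--     for j in range(smbios_idx - 1, -1, -1):
--         if "Arm ACS Version" in lines[j]:
--             start = j
--             break
--         if "BBR ACS" in lines[j]:
--             start = j
--             break
--
--     # 3) Find block end (next Arm ACS header = next test)
--     end = n
--     for k in range(smbios_idx + 1, n):
--         if "Arm ACS Version" in lines[k]:
--             end = k
--             break
--
--     return lines[start:end]
-- ===== SOURCE B (Python) =====
-- def extract_smbios_block(lines):
--     """Single forward pass: track the most recent ACS/BBR header index; on the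
--     first 'SmbiosTable' line fix start there and keep scanning for the next
--     'Arm ACS Version' header, which ends the block."""
--     last_header = 0
--     start = None
--     for i, line in enumerate(lines):
--         if start is None:
--             if "SmbiosTable" in line:
--                 start = last_header
--             elif "Arm ACS Version" in line or "BBR ACS" in line:
--                 last_header = i
--         elif "Arm ACS Version" in line:
--             return lines[start:i]
--     if start is None:
--         return []
--     return lines[start:]
-- ===== Notes on version B (the rewrite author's own statement) =====
-- stated objective: simpler
-- what changed: Replaced the three separate scans (find SmbiosTable, walk backwards for the header, walk forwards for the next header) by one forward pass that tracks the last header index and switches phase when SmbiosTable is seen, returning as soon as the closing header is found.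
import Mathlib
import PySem

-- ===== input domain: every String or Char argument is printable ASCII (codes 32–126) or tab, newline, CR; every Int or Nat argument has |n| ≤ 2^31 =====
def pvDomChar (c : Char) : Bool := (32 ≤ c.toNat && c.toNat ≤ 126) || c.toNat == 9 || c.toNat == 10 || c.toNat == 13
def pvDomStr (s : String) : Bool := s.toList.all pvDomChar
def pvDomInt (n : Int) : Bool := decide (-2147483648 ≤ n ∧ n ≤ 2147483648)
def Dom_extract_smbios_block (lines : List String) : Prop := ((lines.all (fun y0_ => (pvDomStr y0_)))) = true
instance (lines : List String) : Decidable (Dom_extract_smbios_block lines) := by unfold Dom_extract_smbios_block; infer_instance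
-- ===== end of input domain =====

-- B replaces A's three separate scans by one forward pass that tracks the last
-- header index (objective: simpler single-pass decomposition, same O(n) cost).

-- ===== PORT A =====
-- step 1: 'for i, line in enumerate(lines): if "SmbiosTable" in line: smbios_idx = i; break'
def pvFindSm : List String → Nat → Option Nat
  | [], _ => none
  | l :: rs, i => if PySem.Str.isIn "SmbiosTable" l then some i else pvFindSm rs (i + 1)

-- step 2: 'for j in range(smbios_idx - 1, -1, -1): …' — called with j-count = smbios_idx
def pvBackScan (lines : List String) : Nat → Nat
  | 0 => 0
  | j + 1 =>
    if PySem.Str.isIn "Arm ACS Version" (lines.getD j "") then j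
    else if PySem.Str.isIn "BBR ACS" (lines.getD j "") then j
    else pvBackScan lines j

-- step 3: 'for k in range(smbios_idx + 1, n): …' — over the suffix lines[k:], default end = n
def pvFwdEnd (n : Nat) : List String → Nat → Nat
  | [], _ => n
  | l :: rs, k => if PySem.Str.isIn "Arm ACS Version" l then k else pvFwdEnd n rs (k + 1)

def extract_smbios_block (lines : List String) : List String :=
  let n := lines.length
  match pvFindSm lines 0 with
  | none => []
  | some s =>
    let start := pvBackScan lines s
    let stop := pvFwdEnd n (lines.drop (s + 1)) (s + 1)
    PySem.List.slice lines (some (start : Int)) (some (stop : Int))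

-- ===== PORT B =====
-- phase 2 of B's single loop: scanning for the closing 'Arm ACS Version'
def pvAltEnd (all : List String) (start : Nat) : List String → Nat → List String
  | [], _ => PySem.List.slice all (some (start : Int)) none
  | l :: rs, i =>
    if PySem.Str.isIn "Arm ACS Version" l then
      PySem.List.slice all (some (start : Int)) (some (i : Int))
    else pvAltEnd all start rs (i + 1)

-- phase 1 of B's loop: tracking last_header until the first 'SmbiosTable'
def pvAltScan (all : List String) : List String → Nat → Nat → List String
  | [], _, _ => []
  | l :: rs, i, lastHeader =>
    if PySem.Str.isIn "SmbiosTable" l then pvAltEnd all lastHeader rs (i + 1)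
    else if PySem.Str.isIn "Arm ACS Version" l || PySem.Str.isIn "BBR ACS" l then
      pvAltScan all rs (i + 1) i
    else pvAltScan all rs (i + 1) lastHeader

def extract_smbios_block_alt (lines : List String) : List String :=
  pvAltScan lines lines 0 0

-- ===== PRECONDITION & SPEC =====
def Spec_extract_smbios_block (lines : List String) (out : List String) : Prop := out = extract_smbios_block_alt lines
instance (lines : List String) (out : List String) : Decidable (Spec_extract_smbios_block lines out) := by unfold Spec_extract_smbios_block; infer_instance

-- ===== CLAIM (what is proved, stated in full; the proofs are below) =====
def Claim_equal_extract_smbios_block : Prop := ∀ (lines : List String), Dom_extract_smbios_block lines → Spec_extract_smbios_block lines (extract_smbios_block lines)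

-- ===== LEMMAS AND PROOFS =====

theorem pvAltEnd_eq (all : List String) (start : Nat) :
    ∀ (rest : List String) (i : Nat),
      pvAltEnd all start rest i =
        PySem.List.slice all (some (start : Int)) (some ((pvFwdEnd all.length rest i : Nat) : Int)) := by
  intro rest
  induction rest with
  | nil =>
    intro i
    simp [pvAltEnd, pvFwdEnd, PySem.List.slice_from_natCast, PySem.List.slice_natCast,
      List.take_of_length_le]
  | cons l rs ih =>
    intro i
    simp only [pvAltEnd, pvFwdEnd]
    by_cases h : PySem.Str.isIn "Arm ACS Version" l = true
    · rw [if_pos h, if_pos h]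
    · rw [if_neg h, if_neg h, ih]

theorem pvAltScan_eq (lines : List String) :
    ∀ (rest : List String) (i lastHeader : Nat),
      lines.drop i = rest → lastHeader = pvBackScan lines i →
      pvAltScan lines rest i lastHeader =
        (match pvFindSm rest i with
         | none => []
         | some s =>
           PySem.List.slice lines (some ((pvBackScan lines s : Nat) : Int))
             (some ((pvFwdEnd lines.length (lines.drop (s + 1)) (s + 1) : Nat) : Int))) := by
  intro rest
  induction rest with
  | nil => intro i lh _ _; simp [pvAltScan, pvFindSm]
  | cons l rs ih =>
    intro i lh hdrop hlh
    have hget : lines[i]? = some l := by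
      have h0 : (lines.drop i)[0]? = some l := by rw [hdrop]; rfl
      rwa [List.getElem?_drop, Nat.add_zero] at h0
    have hgetD : lines.getD i "" = l := by
      rw [List.getD_eq_getElem?_getD, hget]; rfl
    have hdrop1 : lines.drop (i + 1) = rs := by
      have hc := congrArg (List.drop 1) hdrop
      simpa [List.drop_drop, Nat.add_comm] using hc
    have hback : pvBackScan lines (i + 1) =
        if PySem.Str.isIn "Arm ACS Version" l || PySem.Str.isIn "BBR ACS" l then i
        else lh := by
      simp only [pvBackScan, hgetD]
      by_cases h1 : PySem.Str.isIn "Arm ACS Version" l = true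
      · rw [if_pos h1, if_pos (by rw [h1]; exact Bool.true_or _)]
      · rw [if_neg h1]
        by_cases h2 : PySem.Str.isIn "BBR ACS" l = true
        · rw [if_pos h2, if_pos (by rw [h2]; exact Bool.or_true _)]
        · have hor : ¬ (PySem.Str.isIn "Arm ACS Version" l || PySem.Str.isIn "BBR ACS" l) = true := by
            intro hc
            rcases (by simpa using hc : PySem.Str.isIn "Arm ACS Version" l = true ∨ PySem.Str.isIn "BBR ACS" l = true) with h | h
            · exact h1 h
            · exact h2 h
          rw [if_neg h2, if_neg hor, hlh]
    simp only [pvAltScan, pvFindSm]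
    by_cases hs : PySem.Str.isIn "SmbiosTable" l = true
    · rw [if_pos hs, if_pos hs, pvAltEnd_eq, ← hdrop1, hlh]
    · rw [if_neg hs, if_neg hs]
      by_cases hh : (PySem.Str.isIn "Arm ACS Version" l || PySem.Str.isIn "BBR ACS" l) = true
      · rw [if_pos hh]
        exact ih (i + 1) i hdrop1 (by rw [hback, if_pos hh])
      · rw [if_neg hh]
        exact ih (i + 1) lh hdrop1 (by rw [hback, if_neg hh])

-- ===== VERDICT (by name: the statement is the Claim_ definition above) =====
theorem extract_smbios_block_spec : Claim_equal_extract_smbios_block := by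
  intro lines _
  unfold Spec_extract_smbios_block extract_smbios_block extract_smbios_block_alt
  rw [pvAltScan_eq lines lines 0 0 (by simp) (by simp [pvBackScan])]
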